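-- pv_equiv track=rewrite | github.com/domenecsos/NppPasteMarkdownImages | PasteImageSave.py | capitalizeDescription
-- ===== SOURCE A (Python) =====
-- def capitalizeDescription(s):
--     # s = s.lower()
--     result = []
--     capitalize_next = False
--
--     for ch in s:
--         if ch == " ":
--             capitalize_next = True
--         else:
--             if capitalize_next:
--                 result.append(ch.upper())
--                 capitalize_next = False
--             else:
--                 result.append(ch)
--
--     return "".join(result)
-- ===== SOURCE B (Python) =====
-- def capitalizeDescription(s):
--     words = s.split(" ")
--     return "".join([words[0]] + [w[:1].upper() + w[1:] for w in words[1:]])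
-- ===== Notes on version B (the rewrite author's own statement) =====
-- stated objective: idiomatic
-- what changed: Replaces the flag-driven per-character scan with a split-on-space followed by capitalizing the first character of every segment after the first and joining; str.split/join push the work into C, a constant-factor speedup.
import Mathlib
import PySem

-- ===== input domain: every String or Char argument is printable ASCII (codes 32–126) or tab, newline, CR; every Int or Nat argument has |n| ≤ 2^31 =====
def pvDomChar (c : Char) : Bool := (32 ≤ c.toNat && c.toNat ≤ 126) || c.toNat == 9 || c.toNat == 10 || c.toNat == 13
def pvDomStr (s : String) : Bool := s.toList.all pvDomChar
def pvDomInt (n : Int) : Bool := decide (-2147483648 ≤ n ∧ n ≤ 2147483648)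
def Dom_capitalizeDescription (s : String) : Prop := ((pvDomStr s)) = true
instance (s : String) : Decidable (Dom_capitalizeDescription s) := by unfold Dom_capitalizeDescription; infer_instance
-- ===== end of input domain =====

-- B: same task written idiomatically — split on " ", capitalize the first character of every
-- segment after the first, join; instead of A's flag-driven per-character scan.


-- ===== PORT A =====
-- the for-loop over the characters, state = (result, capitalize_next)
def capitalizeDescription (s : String) : String :=
  let st := s.toList.foldl (fun (st : List Char × Bool) ch =>
      if ch = ' ' then (st.1, true)
      else if st.2 then (st.1 ++ [PySem.Chars.upperChar ch], false)
      else (st.1 ++ [ch], false)) ([], false)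
  String.ofList st.1

-- ===== PORT B =====
-- w[:1].upper() + w[1:]
def capWord (w : List Char) : List Char :=
  PySem.Chars.upper (PySem.List.slice w none (some 1)) ++ PySem.List.slice w (some 1) none

-- words = s.split(" "); "".join([words[0]] + [w[:1].upper() + w[1:] for w in words[1:]])
def capitalizeDescription_alt (s : String) : String :=
  let words := s.toList.splitOn ' '
  String.ofList (PySem.Chars.join [] (words.take 1 ++ (words.drop 1).map capWord))

-- ===== PRECONDITION & SPEC =====
def Spec_capitalizeDescription (s : String) (out : String) : Prop := out = capitalizeDescription_alt s
instance (s : String) (out : String) : Decidable (Spec_capitalizeDescription s out) := by unfold Spec_capitalizeDescription; infer_instance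

-- ===== CLAIM (what is proved, stated in full; the proofs are below) =====
def Claim_equal_capitalizeDescription : Prop := ∀ (s : String), Dom_capitalizeDescription s → Spec_capitalizeDescription s (capitalizeDescription s)

-- ===== LEMMAS AND PROOFS =====

-- A's loop as a structural recursion on the remaining characters (flag = capitalize_next)
def goA : Bool → List Char → List Char
  | _, [] => []
  | flag, c :: cs =>
      if c = ' ' then goA true cs
      else (if flag then PySem.Chars.upperChar c else c) :: goA false cs

theorem foldl_eq_goA (cs : List Char) (res : List Char) (flag : Bool) :
    (cs.foldl (fun (st : List Char × Bool) ch =>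
      if ch = ' ' then (st.1, true)
      else if st.2 then (st.1 ++ [PySem.Chars.upperChar ch], false)
      else (st.1 ++ [ch], false)) (res, flag)).1 = res ++ goA flag cs := by
  induction cs generalizing res flag with
  | nil => simp [goA]
  | cons c cs ih =>
    by_cases h : c = ' '
    · simp [goA, h, ih]
    · cases flag <;> simp [goA, h, ih]

theorem capWord_nil : capWord [] = [] := by decide

theorem capWord_cons (c : Char) (r : List Char) :
    capWord (c :: r) = PySem.Chars.upperChar c :: r := by
  have h1 : PySem.List.slice (c :: r) none (some ((1 : Nat) : Int)) = (c :: r).take 1 :=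
    PySem.List.slice_to_natCast _ _
  rw [capWord, PySem.List.slice_from_one]
  norm_num at h1
  rw [h1]
  rfl

theorem splitOn_cons (c : Char) (cs : List Char) :
    (c :: cs).splitOn ' ' =
      if c = ' ' then [] :: cs.splitOn ' ' else (cs.splitOn ' ').modifyHead (List.cons c) := by
  simp [List.splitOn, List.splitOnP_cons]

theorem flatten_intersperse_nil (parts : List (List Char)) :
    (List.intersperse ([] : List Char) parts).flatten = parts.flatten := by
  induction parts with
  | nil => rfl
  | cons p ps ih =>
    cases ps with
    | nil => rfl
    | cons q qs => simpa [List.intersperse] using ih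

theorem join_nil_eq_flatten (parts : List (List Char)) :
    PySem.Chars.join [] parts = parts.flatten := by
  simp [PySem.Chars.join, List.intercalate, flatten_intersperse_nil]

-- B's value of the two loop modes, phrased on the split pieces
def bFalse (cs : List Char) : List Char :=
  (cs.splitOn ' ').headD [] ++ (((cs.splitOn ' ').drop 1).map capWord).flatten
def bTrue (cs : List Char) : List Char :=
  ((cs.splitOn ' ').map capWord).flatten

theorem goA_eq_b (cs : List Char) : goA false cs = bFalse cs ∧ goA true cs = bTrue cs := by
  induction cs with
  | nil => exact ⟨by decide, by decide⟩
  | cons c cs ih =>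
    obtain ⟨ihF, ihT⟩ := ih
    by_cases h : c = ' '
    · constructor
      · simp [goA, h, bFalse, splitOn_cons, ihT, bTrue]
      · simp [goA, h, bTrue, splitOn_cons, ihT, capWord_nil]
    · obtain ⟨p, ps, hps⟩ : ∃ p ps, cs.splitOn ' ' = p :: ps := by
        rcases hne : cs.splitOn ' ' with _ | ⟨p, ps⟩
        · exact absurd hne (List.splitOnP_ne_nil _ _)
        · exact ⟨p, ps, rfl⟩
      constructor
      · simp [goA, h, bFalse, splitOn_cons, hps, ihF]
      · simp [goA, h, bTrue, splitOn_cons, hps, capWord_cons, ihF, bFalse]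

theorem take_one_headD (ps : List (List Char)) (h : ps ≠ []) :
    ps.take 1 = [ps.headD []] := by
  cases ps with
  | nil => exact absurd rfl h
  | cons p q => rfl

-- ===== VERDICT (by name: the statement is the Claim_ definition above) =====
theorem capitalizeDescription_spec : Claim_equal_capitalizeDescription := by
  intro s _
  unfold Spec_capitalizeDescription capitalizeDescription capitalizeDescription_alt
  have hne : s.toList.splitOn ' ' ≠ [] := List.splitOnP_ne_nil _ _
  simp only [foldl_eq_goA, List.nil_append, join_nil_eq_flatten,
    take_one_headD _ hne]
  have := (goA_eq_b s.toList).1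
  simp [this, bFalse]
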